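-- pv_equiv track=rewrite | github.com/PHGMorgan/bookbot | main.py | dict_of_words
-- ===== SOURCE A (Python) =====
-- def sort_by_number(item):
--     return item["number"]
--
-- def dict_of_words(book_as_string):
--     list_of_book_words = book_as_string.split()
--     words_dict = {}
--     sorted_words_list = []
--     final_word_list = []
--     for f in list_of_book_words:
--         words_dict[f] = words_dict.get(f, 0) + 1
--     for word in words_dict:
--         sorted_words_list.append({"word": word, "number": words_dict[word]})
--     sorted_words_list.sort(key=sort_by_number, reverse=True)
--     for w in sorted_words_list:
--         final_word_list.append(w["word"])
--     return final_word_list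
-- ===== SOURCE B (Python) =====
-- def dict_of_words(book_as_string):
--     counts = {}
--     for w in book_as_string.split():
--         counts[w] = counts.get(w, 0) + 1
--     buckets = {}
--     for word, n in counts.items():
--         buckets.setdefault(n, []).append(word)
--     result = []
--     if buckets:
--         for c in range(max(buckets), 0, -1):
--             result.extend(buckets.get(c, []))
--     return result
-- ===== Notes on version B (the rewrite author's own statement) =====
-- stated objective: alternative
-- what changed: B replaces A's record-building pass plus comparison sort (sorted by count descending) with a counting/bucket sort: words are grouped into buckets keyed by their count in one pass over the count dict, then the buckets are emitted for counts from the maximum down to 1, reproducing the stable descending order.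
import Mathlib
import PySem

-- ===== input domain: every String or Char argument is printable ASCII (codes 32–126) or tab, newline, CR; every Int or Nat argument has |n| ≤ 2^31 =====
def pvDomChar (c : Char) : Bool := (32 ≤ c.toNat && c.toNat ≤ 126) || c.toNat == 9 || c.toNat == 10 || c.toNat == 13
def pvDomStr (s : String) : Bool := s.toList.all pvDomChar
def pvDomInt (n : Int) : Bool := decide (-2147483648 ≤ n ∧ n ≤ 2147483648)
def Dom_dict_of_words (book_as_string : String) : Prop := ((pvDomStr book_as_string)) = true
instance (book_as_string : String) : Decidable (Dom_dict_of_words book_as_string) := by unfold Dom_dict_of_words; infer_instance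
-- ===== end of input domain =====

-- B replaces A's comparison sort of count records by a counting/bucket sort over frequencies (alternative algorithm, same result).

-- ===== PORT A =====
-- sort_by_number(item) = item["number"]; records {"word":…, "number":…} are ported as pairs (word, number)
def dict_of_words (book_as_string : String) : List String :=
  let list_of_book_words := PySem.Str.split₀ book_as_string
  let words_dict := list_of_book_words.foldl
    (fun d f => d.insert f (d.getD f 0 + 1)) (PySem.Dict.empty : PySem.Dict String Int)
  let sorted_words_list := words_dict.items.foldl
    (fun acc p => acc ++ [(p.1, p.2)]) ([] : List (String × Int))
  let sorted_words_list := PySem.List.sorted sorted_words_list (fun w => w.2) true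
  sorted_words_list.foldl (fun acc w => acc ++ [w.1]) []

-- ===== PORT B =====
def dict_of_words_alt (book_as_string : String) : List String :=
  let counts := (PySem.Str.split₀ book_as_string).foldl
    (fun d w => d.insert w (d.getD w 0 + 1)) (PySem.Dict.empty : PySem.Dict String Int)
  let buckets := counts.items.foldl
    (fun b p => b.modify p.2 [] (fun l => l ++ [p.1])) (PySem.Dict.empty : PySem.Dict Int (List String))
  if buckets.items.isEmpty then []
  else
    match PySem.List.max? buckets.keys (fun k => k) with
    | none => []   -- unreachable under the guard (Python's max would raise on an empty dict)
    | some m => (PySem.List.pyRange m 0 (-1)).foldl (fun r c => r ++ buckets.getD c []) []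

-- ===== PRECONDITION & SPEC =====
def Spec_dict_of_words (book_as_string : String) (out : List String) : Prop := out = dict_of_words_alt book_as_string
instance (book_as_string : String) (out : List String) : Decidable (Spec_dict_of_words book_as_string out) := by unfold Spec_dict_of_words; infer_instance

-- ===== CLAIM (what is proved, stated in full; the proofs are below) =====
def Claim_equal_dict_of_words : Prop := ∀ (book_as_string : String), Dom_dict_of_words book_as_string → Spec_dict_of_words book_as_string (dict_of_words book_as_string)

-- ===== LEMMAS AND PROOFS =====

-- insertBy walks past a prefix it is not inserted into
theorem insertBy_append_left {α : Type} (bef : α → α → Bool) (a : α) (as bs : List α)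
    (h : ∀ y ∈ as, bef a y = false) :
    PySem.List.insertBy bef a (as ++ bs) = as ++ PySem.List.insertBy bef a bs := by
  induction as with
  | nil => simp
  | cons y ys ih =>
    simp only [List.cons_append, PySem.List.insertBy]
    rw [h y (by simp)]
    simp [ih (fun z hz => h z (by simp [hz]))]

-- insertBy puts a exactly between a false-prefix and a true-suffix
theorem insertBy_middle {α : Type} (bef : α → α → Bool) (a : α) (as bs : List α)
    (h1 : ∀ y ∈ as, bef a y = false) (h2 : ∀ y ∈ bs, bef a y = true) :
    PySem.List.insertBy bef a (as ++ bs) = as ++ a :: bs := by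
  rw [insertBy_append_left bef a as bs h1]
  cases bs with
  | nil => simp [PySem.List.insertBy]
  | cons y ys =>
    simp only [PySem.List.insertBy]
    rw [h2 y (by simp)]
    simp

-- inserting one element into a concatenation of strictly-descending key buckets lands at the end of its bucket
theorem insertBy_flatMap {α : Type} (key : α → Int) (a : α) :
    ∀ (cs : List Int) (g : Int → List α), cs.Pairwise (· > ·) →
      (∀ c ∈ cs, ∀ x ∈ g c, key x = c) → key a ∈ cs →
      PySem.List.insertBy (fun p q => decide (key q < key p)) a (cs.flatMap g)
        = cs.flatMap (fun c => g c ++ if key a = c then [a] else []) := by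
  intro cs
  induction cs with
  | nil => intro g _ _ h; simp at h
  | cons c cs' ih =>
    intro g hp hg hm
    have hlt : ∀ c' ∈ cs', c' < c := fun c' hc' => (List.pairwise_cons.mp hp).1 c' hc'
    have hp' := (List.pairwise_cons.mp hp).2
    simp only [List.flatMap_cons]
    by_cases hac : key a = c
    · have hnot : ∀ y ∈ g c, (fun p q => decide (key q < key p)) a y = false := by
        intro y hy
        have := hg c (by simp) y hy
        simp [this, hac]
      have hyes : ∀ y ∈ cs'.flatMap g, (fun p q => decide (key q < key p)) a y = true := by
        intro y hy
        obtain ⟨c', hc', hyg⟩ := List.mem_flatMap.mp hy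
        have := hg c' (by simp [hc']) y hyg
        simp [this, hac]
        exact hlt c' hc'
      rw [insertBy_middle _ a _ _ hnot hyes]
      have : cs'.flatMap (fun c' => g c' ++ if key a = c' then [a] else []) = cs'.flatMap g := by
        apply List.flatMap_congr
        intro c' hc'
        have : key a ≠ c' := by
          have := hlt c' hc'; omega
        simp [this]
      rw [this]
      simp [hac]
    · have hm' : key a ∈ cs' := by
        rcases List.mem_cons.mp hm with h | h
        · exact absurd h hac
        · exact h
      have hnot : ∀ y ∈ g c, (fun p q => decide (key q < key p)) a y = false := by
        intro y hy
        have hyk := hg c (by simp) y hy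
        have : key a < c := hlt _ hm'
        simp [hyk]; omega
      rw [insertBy_append_left _ a _ _ hnot]
      rw [ih g hp' (fun c' hc' => hg c' (by simp [hc'])) hm']
      simp [hac]

-- the stable descending sort is the concatenation of its key buckets, keys strictly descending
theorem sorted_rev_eq_flatMap_filter {α : Type} (key : α → Int) (xs : List α) (cs : List Int)
    (hp : cs.Pairwise (· > ·)) (hm : ∀ x ∈ xs, key x ∈ cs) :
    PySem.List.sorted xs key true = cs.flatMap (fun c => xs.filter (fun x => key x == c)) := by
  rw [PySem.List.sorted_rev_eq_foldl_insertBy]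
  induction xs using List.reverseRecOn with
  | nil => simp
  | append_singleton xs a ih =>
    rw [List.foldl_append, List.foldl_cons, List.foldl_nil]
    rw [ih (fun x hx => hm x (by simp [hx]))]
    rw [insertBy_flatMap key a cs (fun c => xs.filter (fun x => key x == c)) hp
      (fun c _ x hx => by simpa using (List.mem_filter.mp hx).2)
      (hm a (by simp))]
    apply List.flatMap_congr
    intro c hc
    simp [List.filter_append]
    split <;> simp_all

-- the bucket dict built by B's grouping loop, looked up at c, is the c-bucket of the items list
theorem bucket_getD (items : List (String × Int)) (c : Int) :
    (items.foldl (fun b p => b.modify p.2 [] (fun l => l ++ [p.1]))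
        (PySem.Dict.empty : PySem.Dict Int (List String))).getD c []
      = (items.filter (fun p => p.2 == c)).map (fun p => p.1) := by
  have h := PySem.Dict.getD_foldl_modify_append (items.map (fun p => (p.2, p.1)))
    (PySem.Dict.empty : PySem.Dict Int (List String)) c
  rw [List.foldl_map] at h
  simpa [List.filter_map, Function.comp] using h

theorem bucket_keys (items : List (String × Int)) :
    (items.foldl (fun b p => b.modify p.2 [] (fun l => l ++ [p.1]))
        (PySem.Dict.empty : PySem.Dict Int (List String))).keys
      = PySem.Set.ofList (items.map (fun p => p.2)) := by
  have h := PySem.Dict.keys_foldl_modify_key items (fun p => p.2) ([] : List String)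
    (fun _ p => (fun l => l ++ [p.1])) PySem.Dict.empty
  simpa [PySem.Set.update_nil_left] using h

theorem dict_eq (s : String) : dict_of_words s = dict_of_words_alt s := by
  simp only [dict_of_words, dict_of_words_alt,
    PySem.Dict.foldl_insert_getD_add_one_eq_counter,
    PySem.List.foldl_append_singleton_eq_map, List.nil_append, Prod.mk.eta, List.map_id']
  rcases eq_or_ne (PySem.Str.split₀ s) [] with hws | hws
  · simp [hws, PySem.Dict.counter]
    rfl
  · set ws := PySem.Str.split₀ s with hwsdef
    set items := (PySem.Dict.counter ws).items with hitemsdef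
    set buckets := items.foldl (fun b p => b.modify p.2 [] (fun l => l ++ [p.1]))
      (PySem.Dict.empty : PySem.Dict Int (List String)) with hbucketsdef
    have hit : items = (PySem.Set.ofList ws).map (fun k => (k, ((ws.count k : Nat) : Int))) :=
      PySem.Dict.items_counter ws
    obtain ⟨w, hw⟩ := List.exists_mem_of_ne_nil ws hws
    have hw' : w ∈ PySem.Set.ofList ws := (PySem.Set.mem_ofList _ _).mpr hw
    have hine : items ≠ [] := by
      rw [hit]
      intro h
      rw [List.map_eq_nil_iff] at h
      simp [h] at hw'
    have hkeys : buckets.keys = PySem.Set.ofList (items.map (fun p => p.2)) := bucket_keys items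
    have hkne : buckets.keys ≠ [] := by
      rw [hkeys]
      intro h
      rcases List.exists_mem_of_ne_nil items hine with ⟨p, hp⟩
      have : p.2 ∈ PySem.Set.ofList (items.map (fun p => p.2)) :=
        (PySem.Set.mem_ofList _ _).mpr (List.mem_map_of_mem hp)
      simp [h] at this
    have hbine : buckets.items.isEmpty = false := by
      rw [List.isEmpty_eq_false_iff_exists_mem]
      have : buckets.keys = buckets.items.map (fun p => p.1) := rfl
      rcases List.exists_mem_of_ne_nil _ (by rw [this] at hkne; intro h; simp [h] at hkne :
        buckets.items ≠ []) with ⟨q, hq⟩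
      exact ⟨q, hq⟩
    obtain ⟨m, hm⟩ : ∃ m, PySem.List.max? buckets.keys (fun k => k) = some m := by
      cases h : PySem.List.max? buckets.keys (fun k => k) with
      | none => exact absurd ((PySem.List.max?_eq_none_iff _ _).mp h) hkne
      | some m => exact ⟨m, rfl⟩
    rw [hbine, hm]
    simp only [Bool.false_eq_true, if_false]
    rw [PySem.List.foldl_append_eq_flatMap, List.nil_append]
    have hp : (PySem.List.pyRange m 0 (-1)).Pairwise (· > ·) := by
      rw [PySem.List.pyRange_neg_one_eq_reverse]
      exact List.pairwise_reverse.mpr (PySem.List.pairwise_lt_pyRange_one 1 (m + 1))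
    have hmem : ∀ p ∈ items, (fun p : String × Int => p.2) p ∈ PySem.List.pyRange m 0 (-1) := by
      intro p hp
      rw [PySem.List.mem_pyRange_neg_one]
      constructor
      · rw [hit] at hp
        rcases List.mem_map.mp hp with ⟨k, hk, rfl⟩
        have : 0 < ws.count k := List.count_pos_iff.mpr ((PySem.Set.mem_ofList _ _).mp hk)
        simpa using this
      · have h2 : p.2 ∈ buckets.keys := by
          rw [hkeys]
          exact (PySem.Set.mem_ofList _ _).mpr (List.mem_map_of_mem hp)
        exact PySem.List.max?_isMax hm p.2 h2
    rw [sorted_rev_eq_flatMap_filter (fun p => p.2) items (PySem.List.pyRange m 0 (-1)) hp hmem]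
    rw [List.map_flatMap]
    apply List.flatMap_congr
    intro c _
    exact (bucket_getD items c).symm

-- ===== VERDICT (by name: the statement is the Claim_ definition above) =====
theorem dict_of_words_spec : Claim_equal_dict_of_words := by
  intro s _
  exact dict_eq s
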